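-- pv_equiv track=rewrite | github.com/UlisesFox/SugeridorDeRecetas | ProyectIoT/ReaderCode/ia.py | generar_combinaciones
-- ===== SOURCE A (Python) =====
-- from itertools import combinations
--
-- def generar_combinaciones(ids, max_comb_size):
--     combs = []
--     sums = []
--     for i in range(1, max_comb_size + 1):
--         for comb in combinations(ids, i):
--             combs.append(comb)
--             sums.append(sum(comb))
--     return combs, sums
-- ===== SOURCE B (Python) =====
-- def generar_combinaciones(ids, max_comb_size):
--     # level-by-level extension: carry (combination, remaining suffix, running sum);
--     # no itertools, each sum is computed incrementally in O(1)
--     ids = list(ids)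
--     combs, sums = [], []
--     level = [((x,), ids[i + 1:], x) for i, x in enumerate(ids)]
--     size = 1
--     while size <= max_comb_size and level:
--         for comb, _rest, s in level:
--             combs.append(comb)
--             sums.append(s)
--         nxt = []
--         for comb, rest, s in level:
--             for i, x in enumerate(rest):
--                 nxt.append((comb + (x,), rest[i + 1:], s + x))
--         level = nxt
--         size += 1
--     return combs, sums
-- ===== Notes on version B (the rewrite author's own statement) =====
-- stated objective: alternative
-- what changed: Replaces itertools.combinations (restarted from scratch for each size, each sum recomputed over the whole tuple) by an iterative level-by-level construction that extends each size-k combination with the elements of its remaining suffix, carrying the running sum so each new sum costs O(1), and stops as soon as a level is empty.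
import Mathlib
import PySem

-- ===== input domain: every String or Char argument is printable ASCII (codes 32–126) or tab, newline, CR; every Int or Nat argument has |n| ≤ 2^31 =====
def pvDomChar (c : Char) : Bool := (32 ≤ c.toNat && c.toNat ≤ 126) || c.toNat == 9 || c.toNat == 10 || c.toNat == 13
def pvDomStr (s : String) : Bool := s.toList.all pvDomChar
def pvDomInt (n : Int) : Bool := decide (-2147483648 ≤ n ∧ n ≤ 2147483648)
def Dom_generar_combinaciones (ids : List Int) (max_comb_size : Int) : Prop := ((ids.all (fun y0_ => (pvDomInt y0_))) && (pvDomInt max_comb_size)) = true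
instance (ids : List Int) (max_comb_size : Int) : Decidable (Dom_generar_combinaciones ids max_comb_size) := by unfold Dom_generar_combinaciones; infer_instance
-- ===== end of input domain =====

-- B replaces itertools.combinations + per-tuple sums by a level-by-level extension that
-- carries running sums and stops when a level is empty (alternative decomposition, same values).


-- ===== PORT A =====
-- itertools.combinations(xs, n) in its exact lexicographic-by-index order
def combA : Nat → List Int → List (List Int)
  | 0, _ => [[]]
  | _ + 1, [] => []
  | n + 1, x :: xs => (combA n xs).map (fun c => x :: c) ++ combA (n + 1) xs

-- for i in range(1, max+1): for comb in combinations(ids, i): combs.append(comb); sums.append(sum(comb))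
-- (i ≥ 1 inside the range, so i.toNat is exact)
def generar_combinaciones (ids : List Int) (max_comb_size : Int) : List (List Int) × List Int :=
  (PySem.List.pyRange 1 (max_comb_size + 1) 1).foldl
    (fun acc i => (combA i.toNat ids).foldl
      (fun acc c => (acc.1 ++ [c], acc.2 ++ [c.sum])) acc)
    ([], [])

-- ===== PORT B =====
-- level = [((x,), ids[i+1:], x) for i, x in enumerate(ids)]
def altInit : List Int → List (List Int × List Int × Int)
  | [] => []
  | x :: rest => ([x], rest, x) :: altInit rest

-- for i, x in enumerate(rest): nxt.append((comb + (x,), rest[i+1:], s + x))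
def altExtend (c : List Int) (s : Int) : List Int → List (List Int × List Int × Int)
  | [] => []
  | x :: rest => (c ++ [x], rest, s + x) :: altExtend c s rest

def altNext (level : List (List Int × List Int × Int)) : List (List Int × List Int × Int) :=
  level.flatMap (fun t => altExtend t.1 t.2.2 t.2.1)

-- while size <= max_comb_size and level: append current level, build next
def altLoop (max_comb_size size : Int) (level : List (List Int × List Int × Int))
    (acc : List (List Int) × List Int) : List (List Int) × List Int :=
  if _h : size ≤ max_comb_size ∧ level ≠ [] then
    altLoop max_comb_size (size + 1) (altNext level)
      (acc.1 ++ level.map (·.1), acc.2 ++ level.map (·.2.2))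
  else acc
termination_by (max_comb_size + 1 - size).toNat
decreasing_by omega

def generar_combinaciones_alt (ids : List Int) (max_comb_size : Int) : List (List Int) × List Int :=
  altLoop max_comb_size 1 (altInit ids) ([], [])

-- ===== PRECONDITION & SPEC =====
def Spec_generar_combinaciones (ids : List Int) (max_comb_size : Int) (out : List (List Int) × List Int) : Prop := out = generar_combinaciones_alt ids max_comb_size
instance (ids : List Int) (max_comb_size : Int) (out : List (List Int) × List Int) : Decidable (Spec_generar_combinaciones ids max_comb_size out) := by unfold Spec_generar_combinaciones; infer_instance

-- ===== CLAIM (what is proved, stated in full; the proofs are below) =====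
def Claim_equal_generar_combinaciones : Prop := ∀ (ids : List Int) (max_comb_size : Int), Dom_generar_combinaciones ids max_comb_size → Spec_generar_combinaciones ids max_comb_size (generar_combinaciones ids max_comb_size)

-- ===== LEMMAS AND PROOFS =====

-- proof-side model of B's levels: size-n extensions of prefix `pfx` (running sum s) from suffix xs
def combR : Nat → List Int → Int → List Int → List (List Int × List Int × Int)
  | 0, pfx, s, xs => [(pfx, xs, s)]
  | _ + 1, _, _, [] => []
  | n + 1, pfx, s, x :: xs => combR n (pfx ++ [x]) (s + x) xs ++ combR (n + 1) pfx s xs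

lemma altExtend_combR (pfx : List Int) (s : Int) (xs : List Int) :
    altExtend pfx s xs = combR 1 pfx s xs := by
  induction xs generalizing pfx s with
  | nil => simp [altExtend, combR]
  | cons x xs ih => simp [altExtend, combR, ih]

lemma altInit_combR (xs : List Int) : altInit xs = combR 1 [] 0 xs := by
  induction xs with
  | nil => simp [altInit, combR]
  | cons x xs ih => simp [altInit, combR, ih]

lemma altNext_combR (n : Nat) (pfx : List Int) (s : Int) (xs : List Int) :
    altNext (combR n pfx s xs) = combR (n + 1) pfx s xs := by
  induction n generalizing pfx s xs with
  | zero => simp [combR, altNext, altExtend_combR]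
  | succ n ihn =>
    induction xs generalizing pfx s with
    | nil => simp [combR, altNext]
    | cons x xs ihx =>
      simp only [combR, altNext, List.flatMap_append]
      rw [show ∀ l, List.flatMap (fun t => altExtend t.1 t.2.2 t.2.1) l = altNext l from fun _ => rfl,
          show ∀ l, List.flatMap (fun t => altExtend t.1 t.2.2 t.2.1) l = altNext l from fun _ => rfl,
          ihn, ihx]

lemma combR_fst (n : Nat) (pfx : List Int) (s : Int) (xs : List Int) :
    (combR n pfx s xs).map (·.1) = (combA n xs).map (pfx ++ ·) := by
  induction n generalizing pfx s xs with
  | zero => simp [combR, combA]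
  | succ n ihn =>
    induction xs generalizing pfx s with
    | nil => simp [combR, combA]
    | cons x xs ihx =>
      simp only [combR, combA, List.map_append, ihn, ihx, List.map_map]
      congr 1
      apply List.map_congr_left
      intro c _
      simp

lemma combR_sum (n : Nat) (pfx : List Int) (s : Int) (xs : List Int) :
    (combR n pfx s xs).map (·.2.2) = (combA n xs).map (fun c => s + c.sum) := by
  induction n generalizing pfx s xs with
  | zero => simp [combR, combA]
  | succ n ihn =>
    induction xs generalizing pfx s with
    | nil => simp [combR, combA]
    | cons x xs ihx =>
      simp only [combR, combA, List.map_append, ihn, ihx, List.map_map]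
      congr 1
      apply List.map_congr_left
      intro c _
      simp
      ring

lemma combA_ne_nil (xs : List Int) (n : Nat) (h : n ≤ xs.length) : combA n xs ≠ [] := by
  induction xs generalizing n with
  | nil =>
    have hn : n = 0 := by simpa using h
    subst hn; simp [combA]
  | cons x xs ih =>
    cases n with
    | zero => simp [combA]
    | succ n =>
      have := ih n (by simpa using h)
      simp [combA]
      intro hmap
      exact absurd hmap this

-- A's inner loop: appending each combination and its sum
lemma foldl_pairs (l : List (List Int)) (a : List (List Int) × List Int) :
    l.foldl (fun acc c => (acc.1 ++ [c], acc.2 ++ [c.sum])) a = (a.1 ++ l, a.2 ++ l.map (·.sum)) := by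
  induction l generalizing a with
  | nil => simp
  | cons c l ih => simp [ih]

def stepA (ids : List Int) (acc : List (List Int) × List Int) (i : Int) :
    List (List Int) × List Int :=
  (acc.1 ++ combA i.toNat ids, acc.2 ++ (combA i.toNat ids).map (·.sum))

lemma foldl_congr_fun {α β : Type} (l : List α) (a : β) (f g : β → α → β)
    (h : ∀ a i, f a i = g a i) : l.foldl f a = l.foldl g a := by
  induction l generalizing a with
  | nil => rfl
  | cons x l ih => simp only [List.foldl]; rw [h]; exact ih _

lemma A_as_stepA (ids : List Int) (m : Int) :
    generar_combinaciones ids m = (PySem.List.pyRange 1 (m + 1) 1).foldl (stepA ids) ([], []) := by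
  unfold generar_combinaciones
  exact foldl_congr_fun _ _ _ _ (fun a i => by rw [foldl_pairs]; rfl)

lemma skip_empty (ids : List Int) (m : Int) :
    ∀ (k : Nat) (size : Int) (acc : List (List Int) × List Int),
      k = (m + 1 - size).toNat → 1 ≤ size → ids.length < size.toNat →
      (PySem.List.pyRange size (m + 1) 1).foldl (stepA ids) acc = acc := by
  intro k
  induction k with
  | zero =>
    intro size acc hk _ _
    rw [PySem.List.pyRange_one_eq_nil (by omega)]
    rfl
  | succ k ih =>
    intro size acc hk h1 hlen
    rw [PySem.List.pyRange_one_cons (by omega)]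
    have hnil : combA size.toNat ids = [] := by
      by_contra h
      rcases Nat.lt_or_ge ids.length size.toNat with _ | hge
      · cases n : combA size.toNat ids with
        | nil => exact h n
        | cons c l =>
          -- show combA is nil when size.toNat > length, by induction on a helper
          exfalso
          revert n
          have : ∀ (xs : List Int) (n : Nat), xs.length < n → combA n xs = [] := by
            intro xs
            induction xs with
            | nil => intro n hn; cases n with | zero => omega | succ n => simp [combA]
            | cons y ys ihy =>
              intro n hn
              cases n with
              | zero => simp at hn
              | succ n => simp [combA, ihy n (by simpa using hn), ihy (n+1) (by simp at hn ⊢; omega)]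
          rw [this ids size.toNat hlen]
          intro n; exact (List.cons_ne_nil c l) n.symm
      · omega
    simp only [List.foldl, stepA, hnil]
    simp only [List.map_nil, List.append_nil]
    exact ih (size + 1) acc (by omega) (by omega) (by omega)

lemma combA_nil_of_combR_nil (ids : List Int) (n : Nat) (h : combR n [] 0 ids = []) :
    ids.length < n := by
  by_contra hle
  have h1 : combA n ids ≠ [] := combA_ne_nil ids n (by omega)
  have h2 := combR_fst n [] 0 ids
  rw [h] at h2
  simp at h2
  exact h1 h2

lemma main_loop (ids : List Int) (m : Int) :
    ∀ (k : Nat) (size : Int) (acc : List (List Int) × List Int),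
      k = (m + 1 - size).toNat → 1 ≤ size →
      altLoop m size (combR size.toNat [] 0 ids) acc
        = (PySem.List.pyRange size (m + 1) 1).foldl (stepA ids) acc := by
  intro k
  induction k with
  | zero =>
    intro size acc hk h1
    rw [altLoop, PySem.List.pyRange_one_eq_nil (by omega), dif_neg (by omega)]
    rfl
  | succ k ih =>
    intro size acc hk h1
    have hsz : size ≤ m := by omega
    by_cases hnil : combR size.toNat [] 0 ids = []
    · rw [altLoop, dif_neg (by simp [hnil])]
      rw [skip_empty ids m (k+1) size acc hk h1 (combA_nil_of_combR_nil ids size.toNat hnil)]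
    · rw [altLoop, dif_pos ⟨hsz, hnil⟩]
      rw [altNext_combR, PySem.List.pyRange_one_cons (by omega)]
      have hcast : (size + 1).toNat = size.toNat + 1 := by omega
      have hacc : (acc.1 ++ (combR size.toNat [] 0 ids).map (·.1),
                   acc.2 ++ (combR size.toNat [] 0 ids).map (·.2.2)) = stepA ids acc size := by
        rw [combR_fst, combR_sum]
        simp [stepA]
      rw [hacc, ← hcast]
      exact ih (size + 1) (stepA ids acc size) (by omega) (by omega)

-- ===== VERDICT (by name: the statement is the Claim_ definition above) =====
theorem generar_combinaciones_spec : Claim_equal_generar_combinaciones := by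
  intro ids m _
  unfold Spec_generar_combinaciones generar_combinaciones_alt
  rw [A_as_stepA, altInit_combR]
  rw [show (1 : Nat) = (1 : Int).toNat from rfl]
  exact (main_loop ids m (m + 1 - 1).toNat 1 ([], []) rfl (by omega)).symm
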